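-- pv_equiv track=rewrite | github.com/funsaized/s11a.com | exporter/src/mdx_converter.py | _ensure_heading
-- ===== SOURCE A (Python) =====
-- from typing import Dict, List, Optional, Any, Tuple
--
-- def _ensure_heading(content: str, metadata: Dict) -> str:
--     """Ensure content starts with a proper heading."""
--     if not content:
--         return content
--
--     # Check if content already starts with a heading
--     lines = content.split('\n')
--     first_non_empty_line = None
--     for line in lines:
--         if line.strip():
--             first_non_empty_line = line.strip()
--             break
--
--     # If the first line is not a markdown heading, add one based on the title
--     if first_non_empty_line and not first_non_empty_line.startswith('#'):
--         title = metadata.get('title', 'Untitled Note')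
--         # If the first line looks like the title but without # prefix, replace it
--         if first_non_empty_line.lower() == title.lower() or \
--            first_non_empty_line.replace(' ', '-').lower() == title.replace(' ', '-').lower():
--             # Replace the first non-empty line with a proper heading
--             for i, line in enumerate(lines):
--                 if line.strip():
--                     lines[i] = f"# {title}"
--                     break
--             content = '\n'.join(lines)
--         else:
--             # Add a heading at the beginning
--             content = f"# {title}\n\n{content}"
--
--     return content
-- ===== SOURCE B (Python) =====
-- def _ensure_heading(content: str, metadata) -> str:
--     """Ensure content starts with a proper heading.
--
--     String-partition formulation: instead of splitting into a list of lines and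
--     scanning it, strip the leading whitespace once (the first non-empty line is
--     the first line of what remains) and rebuild the result with partition /
--     rpartition around that line.
--     """
--     if not content:
--         return content
--     body = content.lstrip()
--     if not body:
--         return content
--     head = content[:len(content) - len(body)]
--     first_line, nl, rest = body.partition('\n')
--     first = first_line.strip()
--     if first.startswith('#'):
--         return content
--     title = metadata.get('title', 'Untitled Note')
--     if first.lower() == title.lower() or \
--        first.replace(' ', '-').lower() == title.replace(' ', '-').lower():
--         pre, nl2, _ = head.rpartition('\n')
--         return pre + nl2 + f"# {title}" + nl + rest
--     return f"# {title}\n\n{content}"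
-- ===== Notes on version B (the rewrite author's own statement) =====
-- stated objective: alternative
-- what changed: B never builds a line list: it strips the leading whitespace once (the remainder starts at the first non-empty line), takes that line with partition('\n'), and rebuilds the replacement result from head.rpartition('\n') and the partition tail by string concatenation, instead of A's split-into-lines, value scan and second index scan with join.
import Mathlib
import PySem

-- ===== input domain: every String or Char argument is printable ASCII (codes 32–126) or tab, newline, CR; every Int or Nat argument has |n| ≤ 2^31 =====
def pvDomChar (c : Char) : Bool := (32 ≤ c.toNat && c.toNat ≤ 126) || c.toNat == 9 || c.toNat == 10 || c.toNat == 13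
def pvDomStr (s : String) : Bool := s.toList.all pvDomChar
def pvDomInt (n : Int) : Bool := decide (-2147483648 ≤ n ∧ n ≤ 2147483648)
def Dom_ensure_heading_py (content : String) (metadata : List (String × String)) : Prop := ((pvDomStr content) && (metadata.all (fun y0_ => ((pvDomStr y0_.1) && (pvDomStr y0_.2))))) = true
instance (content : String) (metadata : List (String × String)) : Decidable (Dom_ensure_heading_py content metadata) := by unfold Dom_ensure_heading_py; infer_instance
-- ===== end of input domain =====

-- B rebuilds the result by whitespace-stripping and string partition instead of A's
-- line-list split and two scans; objective: alternative (same cost, different decomposition).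

-- ===== PORT A =====

-- metadata.get('title', dflt): first-match lookup in the association list (dict convention)
def pvDictGetStr (metadata : List (String × String)) (k dflt : String) : String :=
  match metadata.find? (fun p => p.1 == k) with
  | some p => p.2
  | none => dflt

-- A's first loop: first line with non-empty strip, stripped (break on first hit)
def pvFirstNonEmptyA : List (List Char) → Option (List Char)
  | [] => none
  | l :: rest =>
      if PySem.Chars.strip l ≠ [] then some (PySem.Chars.strip l) else pvFirstNonEmptyA rest

-- A's second loop: replace the first line with non-empty strip by h (break on first hit)
def pvReplaceFirstA (h : List Char) : List (List Char) → List (List Char)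
  | [] => []
  | l :: rest =>
      if PySem.Chars.strip l ≠ [] then h :: rest else l :: pvReplaceFirstA h rest

def ensure_heading_py (content : String) (metadata : List (String × String)) : String :=
  if content = "" then content
  else
    -- content.split('\n'): separator non-empty, so Chars.splitOn is exact
    let lines := PySem.Chars.splitOn content.toList ['\n']
    match pvFirstNonEmptyA lines with
    | none => content
    | some f =>
        -- 'if first_non_empty_line and not first_non_empty_line.startswith("#")'
        if f ≠ [] ∧ ¬ PySem.Chars.startswith f ['#'] then
          let title := (pvDictGetStr metadata "title" "Untitled Note").toList
          if PySem.Chars.lower f = PySem.Chars.lower title ∨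
             PySem.Chars.lower (PySem.Chars.replace f [' '] ['-']) =
               PySem.Chars.lower (PySem.Chars.replace title [' '] ['-']) then
            -- '\n'.join(lines) after replacing the first non-empty line by '# ' + title
            String.ofList (PySem.Chars.join ['\n'] (pvReplaceFirstA ('#' :: ' ' :: title) lines))
          else
            -- f'# {title}\n\n{content}'
            String.ofList ('#' :: ' ' :: title ++ '\n' :: '\n' :: content.toList)
        else content

-- ===== PORT B =====

-- body.partition('\n'): (before first '\n', the separator or [], the rest) — exact hand port
def pvPartNl : List Char → List Char × List Char × List Char
  | [] => ([], [], [])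
  | c :: cs =>
      if c = '\n' then ([], ['\n'], cs)
      else
        let p := pvPartNl cs
        (c :: p.1, p.2.1, p.2.2)

-- head.rpartition('\n'): (before LAST '\n', the separator or [], the rest) — exact hand port
def pvRPartNl : List Char → List Char × List Char × List Char
  | [] => ([], [], [])
  | c :: cs =>
      let p := pvRPartNl cs
      if p.2.1 ≠ [] then (c :: p.1, p.2.1, p.2.2)
      else if c = '\n' then ([], ['\n'], cs)
      else ([], [], c :: cs)

def ensure_heading_py_alt (content : String) (metadata : List (String × String)) : String :=
  if content = "" then content
  else
    let body := PySem.Chars.lstrip content.toList          -- content.lstrip()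
    if body = [] then content
    else
      let head := content.toList.take (content.toList.length - body.length)  -- content[:len(content)-len(body)]
      let p := pvPartNl body                               -- first_line, nl, rest = body.partition('\n')
      let first := PySem.Chars.strip p.1
      if PySem.Chars.startswith first ['#'] then content
      else
        let title := (pvDictGetStr metadata "title" "Untitled Note").toList
        if PySem.Chars.lower first = PySem.Chars.lower title ∨
           PySem.Chars.lower (PySem.Chars.replace first [' '] ['-']) =
             PySem.Chars.lower (PySem.Chars.replace title [' '] ['-']) then
          let r := pvRPartNl head                          -- pre, nl2, _ = head.rpartition('\n')
          String.ofList (r.1 ++ r.2.1 ++ ('#' :: ' ' :: title) ++ p.2.1 ++ p.2.2)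
        else
          String.ofList ('#' :: ' ' :: title ++ '\n' :: '\n' :: content.toList)

-- ===== PRECONDITION & SPEC =====
def Spec_ensure_heading_py (content : String) (metadata : List (String × String)) (out : String) : Prop := out = ensure_heading_py_alt content metadata
instance (content : String) (metadata : List (String × String)) (out : String) : Decidable (Spec_ensure_heading_py content metadata out) := by unfold Spec_ensure_heading_py; infer_instance

-- ===== CLAIM (what is proved, stated in full; the proofs are below) =====
def Claim_equal_ensure_heading_py : Prop := ∀ (content : String) (metadata : List (String × String)), Dom_ensure_heading_py content metadata → Spec_ensure_heading_py content metadata (ensure_heading_py content metadata)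

-- ===== LEMMAS AND PROOFS =====

-- the line list content.split('\n') as a structural recursion
def pvLines : List Char → List (List Char)
  | [] => [[]]
  | c :: cs =>
      if c = '\n' then [] :: pvLines cs
      else
        match pvLines cs with
        | x :: xs => (c :: x) :: xs
        | [] => [[c]]

theorem pvLines_ne_nil (cs : List Char) : pvLines cs ≠ [] := by
  cases cs with
  | nil => simp [pvLines]
  | cons c cs =>
    simp only [pvLines]
    split <;> [simp; (split <;> simp)]

theorem pvLines_nl (cs : List Char) : pvLines ('\n' :: cs) = [] :: pvLines cs := by
  simp [pvLines]

theorem pvLines_other {c : Char} (hc : c ≠ '\n') (cs : List Char) :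
    pvLines (c :: cs) =
      match pvLines cs with
      | x :: xs => (c :: x) :: xs
      | [] => [[c]] := by
  simp [pvLines, hc]

theorem pvGo_spec (fuel : Nat) (l cur : List Char) (acc : List (List Char))
    (h : l.length < fuel) :
    PySem.Chars.splitOn.go ['\n'] fuel l cur acc =
      acc.reverse ++
        (match pvLines l with
         | x :: xs => (cur.reverse ++ x) :: xs
         | [] => [cur.reverse]) := by
  induction fuel generalizing l cur acc with
  | zero => omega
  | succ fuel ih =>
    cases l with
    | nil => simp [PySem.Chars.splitOn.go, pvLines]
    | cons c rest =>
      by_cases hc : c = '\n'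
      · subst hc
        have : PySem.Chars.splitOn.go ['\n'] (fuel + 1) ('\n' :: rest) cur acc =
            PySem.Chars.splitOn.go ['\n'] fuel rest [] (cur.reverse :: acc) := by
          simp [PySem.Chars.splitOn.go, List.isPrefixOf]
        rw [this, ih rest [] (cur.reverse :: acc) (by simpa using Nat.lt_of_succ_lt_succ h),
          pvLines_nl]
        cases hl : pvLines rest with
        | nil => exact absurd hl (pvLines_ne_nil rest)
        | cons x xs => simp
      · have : PySem.Chars.splitOn.go ['\n'] (fuel + 1) (c :: rest) cur acc =
            PySem.Chars.splitOn.go ['\n'] fuel rest (c :: cur) acc := by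
          simp [PySem.Chars.splitOn.go, List.isPrefixOf, Ne.symm hc]
        rw [this, ih rest (c :: cur) acc (by simpa using Nat.lt_of_succ_lt_succ h),
          pvLines_other hc]
        cases hl : pvLines rest with
        | nil => exact absurd hl (pvLines_ne_nil rest)
        | cons x xs => simp

theorem pvSplitOn_nl (cs : List Char) : PySem.Chars.splitOn cs ['\n'] = pvLines cs := by
  rw [show PySem.Chars.splitOn cs ['\n'] =
      PySem.Chars.splitOn.go ['\n'] (cs.length + 1) cs [] [] from rfl,
    pvGo_spec (cs.length + 1) cs [] [] (by omega)]
  cases hl : pvLines cs with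
  | nil => exact absurd hl (pvLines_ne_nil cs)
  | cons x xs => simp

theorem pvLines_nonl (b : List Char) (hb : ∀ c ∈ b, c ≠ '\n') : pvLines b = [b] := by
  induction b with
  | nil => rfl
  | cons c cs ih =>
    have hc : c ≠ '\n' := hb c (by simp)
    rw [pvLines_other hc, ih (fun x hx => hb x (by simp [hx]))]

theorem pvLines_append (b a : List Char) (hb : ∀ c ∈ b, c ≠ '\n') :
    pvLines (b ++ '\n' :: a) = b :: pvLines a := by
  induction b with
  | nil => simpa using pvLines_nl a
  | cons c cs ih =>
    have hc : c ≠ '\n' := hb c (by simp)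
    rw [List.cons_append, pvLines_other hc, ih (fun x hx => hb x (by simp [hx]))]

theorem pvJoin_pvLines (cs : List Char) : PySem.Chars.join ['\n'] (pvLines cs) = cs := by
  induction cs with
  | nil => simp [pvLines, PySem.Chars.join_singleton]
  | cons c cs ih =>
    by_cases hc : c = '\n'
    · subst hc
      rw [pvLines_nl]
      cases hl : pvLines cs with
      | nil => exact absurd hl (pvLines_ne_nil cs)
      | cons x xs =>
        rw [PySem.Chars.join_cons_cons]
        rw [hl] at ih
        simp [ih]
    · rw [pvLines_other hc]
      cases hl : pvLines cs with
      | nil => exact absurd hl (pvLines_ne_nil cs)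
      | cons x xs =>
        rw [hl] at ih
        cases xs with
        | nil => simp_all [PySem.Chars.join_singleton]
        | cons y ys =>
          rw [PySem.Chars.join_cons_cons] at ih ⊢
          simp_all

theorem pvStrip_eq_nil_iff (l : List Char) :
    PySem.Chars.strip l = [] ↔ ∀ c ∈ l, PySem.Chars.isspace c := by
  simp only [PySem.Chars.strip, PySem.Chars.rstrip, PySem.Chars.lstrip,
    List.reverse_eq_nil_iff, List.dropWhile_eq_nil_iff, List.mem_reverse]
  constructor
  · intro h c hc
    rw [← List.takeWhile_append_dropWhile (p := PySem.Chars.isspace) (l := l)] at hc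
    rcases List.mem_append.1 hc with h1 | h1
    · exact List.mem_takeWhile_imp h1
    · exact h c h1
  · intro h c hc
    exact h c ((List.dropWhile_sublist _).subset hc)

theorem pvStrip_dropWhile (l : List Char) :
    PySem.Chars.strip (List.dropWhile PySem.Chars.isspace l) = PySem.Chars.strip l := by
  simp [PySem.Chars.strip, PySem.Chars.lstrip, List.dropWhile_idempotent]

-- partition facts
theorem pvPartNl_spec (cs : List Char) :
    cs = (pvPartNl cs).1 ++ (pvPartNl cs).2.1 ++ (pvPartNl cs).2.2 ∧
    (∀ c ∈ (pvPartNl cs).1, c ≠ '\n') ∧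
    ((pvPartNl cs).2.1 = [] ∧ (pvPartNl cs).2.2 = [] ∨ (pvPartNl cs).2.1 = ['\n']) := by
  induction cs with
  | nil => simp [pvPartNl]
  | cons c cs ih =>
    by_cases hc : c = '\n'
    · subst hc; simp [pvPartNl]
    · obtain ⟨h1, h2, h3⟩ := ih
      refine ⟨?_, ?_, ?_⟩
      · simpa [pvPartNl, hc] using h1
      · intro x hx
        simp only [pvPartNl, if_neg hc, List.mem_cons] at hx
        rcases hx with rfl | hx
        · exact hc
        · exact h2 x hx
      · simpa [pvPartNl, hc] using h3

theorem pvPartNl_nonl (b : List Char) (hb : ∀ c ∈ b, c ≠ '\n') : pvPartNl b = (b, [], []) := by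
  induction b with
  | nil => rfl
  | cons c cs ih =>
    have hc : c ≠ '\n' := hb c (by simp)
    simp [pvPartNl, hc, ih (fun x hx => hb x (by simp [hx]))]

theorem pvPartNl_append (b a : List Char) (hb : ∀ c ∈ b, c ≠ '\n') :
    pvPartNl (b ++ '\n' :: a) = (b, ['\n'], a) := by
  induction b with
  | nil => simp [pvPartNl]
  | cons c cs ih =>
    have hc : c ≠ '\n' := hb c (by simp)
    simp [pvPartNl, hc, ih (fun x hx => hb x (by simp [hx]))]

-- rpartition facts
theorem pvRPartNl_nosep (t : List Char) (h : (pvRPartNl t).2.1 = []) :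
    pvRPartNl t = ([], [], t) := by
  cases t with
  | nil => rfl
  | cons c cs =>
    by_cases h1 : (pvRPartNl cs).2.1 = []
    · by_cases hc : c = '\n'
      · exfalso; simp [pvRPartNl, h1, hc] at h
      · simp [pvRPartNl, h1, hc]
    · exfalso; simp [pvRPartNl, h1] at h

theorem pvRPartNl_append (b t : List Char) (hb : ∀ c ∈ b, c ≠ '\n') :
    pvRPartNl (b ++ '\n' :: t) =
      if (pvRPartNl t).2.1 = [] then (b, ['\n'], t)
      else (b ++ '\n' :: (pvRPartNl t).1, (pvRPartNl t).2.1, (pvRPartNl t).2.2) := by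
  induction b with
  | nil =>
    simp only [List.nil_append, pvRPartNl]
    by_cases h : (pvRPartNl t).2.1 = []
    · simp [h]
    · simp [h]
  | cons c cs ih =>
    have hc : c ≠ '\n' := hb c (by simp)
    have ih' := ih (fun x hx => hb x (by simp [hx]))
    simp only [List.cons_append, pvRPartNl, ih']
    by_cases h : (pvRPartNl t).2.1 = []
    · simp [h]
    · simp [h]

-- dropWhile/takeWhile of strip-empty vs strip-nonempty prefixes
theorem pvDropWhile_append_all (b t : List Char) (hb : ∀ c ∈ b, PySem.Chars.isspace c) :
    List.dropWhile PySem.Chars.isspace (b ++ t) = List.dropWhile PySem.Chars.isspace t := by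
  rw [List.dropWhile_append]
  simp [List.dropWhile_eq_nil_iff.2 hb]

theorem pvTakeWhile_append_all (b t : List Char) (hb : ∀ c ∈ b, PySem.Chars.isspace c) :
    List.takeWhile PySem.Chars.isspace (b ++ t) = b ++ List.takeWhile PySem.Chars.isspace t := by
  rw [List.takeWhile_append]
  simp [List.takeWhile_eq_self_iff.2 hb]

theorem pvDropWhile_append_not (b t : List Char) (hb : ¬ ∀ c ∈ b, PySem.Chars.isspace c) :
    List.dropWhile PySem.Chars.isspace (b ++ t) = List.dropWhile PySem.Chars.isspace b ++ t := by
  rw [List.dropWhile_append]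
  have : List.dropWhile PySem.Chars.isspace b ≠ [] := fun h => hb (List.dropWhile_eq_nil_iff.1 h)
  simp [this]

theorem pvTakeWhile_append_not (b t : List Char) (hb : ¬ ∀ c ∈ b, PySem.Chars.isspace c) :
    List.takeWhile PySem.Chars.isspace (b ++ t) = List.takeWhile PySem.Chars.isspace b := by
  rw [List.takeWhile_append]
  have hlt : (List.takeWhile PySem.Chars.isspace b).length ≠ b.length := by
    intro h
    exact hb (List.takeWhile_eq_self_iff.1 (List.IsPrefix.eq_of_length (List.takeWhile_prefix _) h))
  simp [hlt]

-- B's head = content[:len-len(body)] is the whitespace prefix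
theorem pvTake_sub_eq_takeWhile (cs : List Char) :
    cs.take (cs.length - (List.dropWhile PySem.Chars.isspace cs).length) =
      List.takeWhile PySem.Chars.isspace cs := by
  have hlen : cs.length - (List.dropWhile PySem.Chars.isspace cs).length =
      (List.takeWhile PySem.Chars.isspace cs).length := by
    have := congrArg List.length (List.takeWhile_append_dropWhile
      (p := PySem.Chars.isspace) (l := cs))
    rw [List.length_append] at this
    omega
  rw [hlen, ← List.prefix_iff_eq_take.1 (List.takeWhile_prefix _)]

-- (pvRPartNl of a '\n'-free list has empty separator — used inside pvMain)
theorem pvRPartNl_nonl_eq {t : List Char} (ht : ∀ c ∈ t, c ≠ '\n') :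
    (pvRPartNl t).2.1 = [] := by
  induction t with
  | nil => rfl
  | cons c cs ih =>
    have hc : c ≠ '\n' := ht c (by simp)
    simp [pvRPartNl, ih (fun x hx => ht x (by simp [hx])), hc]

-- MAIN: A's two line scans, expressed through B's strip/partition decomposition
theorem pvMain : ∀ (n : Nat) (cs : List Char), cs.length ≤ n →
    (List.dropWhile PySem.Chars.isspace cs = [] → pvFirstNonEmptyA (pvLines cs) = none) ∧
    (List.dropWhile PySem.Chars.isspace cs ≠ [] →
      pvFirstNonEmptyA (pvLines cs) =
        some (PySem.Chars.strip (pvPartNl (List.dropWhile PySem.Chars.isspace cs)).1) ∧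
      PySem.Chars.strip (pvPartNl (List.dropWhile PySem.Chars.isspace cs)).1 ≠ [] ∧
      ∀ h' : List Char,
        PySem.Chars.join ['\n'] (pvReplaceFirstA h' (pvLines cs)) =
          (pvRPartNl (List.takeWhile PySem.Chars.isspace cs)).1 ++
          (pvRPartNl (List.takeWhile PySem.Chars.isspace cs)).2.1 ++ h' ++
          (pvPartNl (List.dropWhile PySem.Chars.isspace cs)).2.1 ++
          (pvPartNl (List.dropWhile PySem.Chars.isspace cs)).2.2) := by
  intro n
  induction n with
  | zero =>
    intro cs hcs
    have : cs = [] := List.length_eq_zero_iff.1 (Nat.le_zero.1 hcs)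
    subst this
    constructor
    · intro _; simp [pvLines, pvFirstNonEmptyA, PySem.Chars.strip, PySem.Chars.lstrip,
        PySem.Chars.rstrip]
    · intro h; exact absurd rfl h
  | succ n ih =>
    intro cs hcs
    obtain ⟨hdec, hnl, hsep⟩ := pvPartNl_spec cs
    set b := (pvPartNl cs).1 with hb
    by_cases hws : ∀ c ∈ b, PySem.Chars.isspace c
    · -- the first line is all whitespace
      rcases hsep with ⟨hs1, hs2⟩ | hs1
      · -- no '\n' at all: cs = b, all whitespace
        rw [hs1, hs2] at hdec; simp only [List.append_nil] at hdec
        constructor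
        · intro _
          rw [hdec, pvLines_nonl b hnl]
          simp [pvFirstNonEmptyA, (pvStrip_eq_nil_iff _).2 hws]
        · intro hcon
          exact absurd (by rw [hdec]; exact List.dropWhile_eq_nil_iff.2 hws) hcon
      · -- cs = b ++ '\n' :: a with b all whitespace
        rw [hs1] at hdec
        set a := (pvPartNl cs).2.2 with ha
        have hlen : a.length ≤ n := by
          have := congrArg List.length hdec
          simp at this; omega
        obtain ⟨ih1, ih2⟩ := ih a hlen
        have hwsn : ∀ c ∈ b ++ ['\n'], PySem.Chars.isspace c := by
          intro c hc
          rcases List.mem_append.1 hc with h | h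
          · exact hws c h
          · simp at h; subst h; decide
        have hdrop : List.dropWhile PySem.Chars.isspace cs =
            List.dropWhile PySem.Chars.isspace a := by
          rw [hdec]
          exact pvDropWhile_append_all _ _ hwsn
        have htake : List.takeWhile PySem.Chars.isspace cs =
            b ++ '\n' :: List.takeWhile PySem.Chars.isspace a := by
          rw [hdec, pvTakeWhile_append_all _ _ hwsn]
          simp
        have hlines : pvLines cs = b :: pvLines a := by
          rw [hdec, List.append_assoc]
          simp only [List.singleton_append]
          exact pvLines_append b a hnl
        have hbstrip : PySem.Chars.strip b = [] := (pvStrip_eq_nil_iff _).2 hws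
        have hfirst : pvFirstNonEmptyA (pvLines cs) = pvFirstNonEmptyA (pvLines a) := by
          rw [hlines]; simp [pvFirstNonEmptyA, hbstrip]
        constructor
        · intro h
          rw [hfirst]; exact ih1 (hdrop ▸ h)
        · intro h
          rw [hdrop] at h
          obtain ⟨g1, g2, g3⟩ := ih2 h
          refine ⟨by rw [hfirst, hdrop]; exact g1, by rw [hdrop]; exact g2, ?_⟩
          intro h'
          have hrep : pvReplaceFirstA h' (pvLines cs) = b :: pvReplaceFirstA h' (pvLines a) := by
            rw [hlines]; simp [pvReplaceFirstA, hbstrip]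
          have hrepne : pvReplaceFirstA h' (pvLines a) ≠ [] := by
            cases hpl : pvLines a with
            | nil => exact absurd hpl (pvLines_ne_nil a)
            | cons x xs => simp only [pvReplaceFirstA]; split <;> simp
          have hjoin : PySem.Chars.join ['\n'] (pvReplaceFirstA h' (pvLines cs)) =
              b ++ '\n' :: PySem.Chars.join ['\n'] (pvReplaceFirstA h' (pvLines a)) := by
            rw [hrep]
            cases hx : pvReplaceFirstA h' (pvLines a) with
            | nil => exact absurd hx hrepne
            | cons x xs => rw [PySem.Chars.join_cons_cons]; simp
          rw [hjoin, g3 h', hdrop, htake,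
            pvRPartNl_append b (List.takeWhile PySem.Chars.isspace a) hnl]
          by_cases hz : (pvRPartNl (List.takeWhile PySem.Chars.isspace a)).2.1 = []
          · rw [if_pos hz, pvRPartNl_nosep _ hz]
            simp
          · rw [if_neg hz]
            simp
    · -- the first line contains a non-whitespace character
      have hdw : List.dropWhile PySem.Chars.isspace b ≠ [] :=
        fun h => hws (List.dropWhile_eq_nil_iff.1 h)
      have hbs : PySem.Chars.strip b ≠ [] := fun h => hws ((pvStrip_eq_nil_iff b).1 h)
      have hdrop : List.dropWhile PySem.Chars.isspace cs =
          List.dropWhile PySem.Chars.isspace b ++ (pvPartNl cs).2.1 ++ (pvPartNl cs).2.2 := by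
        conv_lhs => rw [hdec, List.append_assoc]
        rw [pvDropWhile_append_not _ _ hws, ← List.append_assoc]
      have htake : List.takeWhile PySem.Chars.isspace cs =
          List.takeWhile PySem.Chars.isspace b := by
        conv_lhs => rw [hdec, List.append_assoc]
        exact pvTakeWhile_append_not _ _ hws
      have hnldw : ∀ c ∈ List.dropWhile PySem.Chars.isspace b, c ≠ '\n' :=
        fun c hc => hnl c ((List.dropWhile_sublist _).subset hc)
      have hnltw : ∀ c ∈ List.takeWhile PySem.Chars.isspace b, c ≠ '\n' :=
        fun c hc => hnl c ((List.takeWhile_sublist _).subset hc)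
      have hpart : pvPartNl (List.dropWhile PySem.Chars.isspace cs) =
          (List.dropWhile PySem.Chars.isspace b, (pvPartNl cs).2.1, (pvPartNl cs).2.2) := by
        rcases hsep with ⟨hs1, hs2⟩ | hs1
        · rw [hdrop, hs1, hs2]
          simp only [List.append_nil]
          rw [pvPartNl_nonl _ hnldw]
        · conv_lhs => rw [hdrop, hs1, List.append_assoc, List.singleton_append]
          rw [pvPartNl_append _ _ hnldw, hs1]
      have hstripb : PySem.Chars.strip (List.dropWhile PySem.Chars.isspace b) =
          PySem.Chars.strip b := pvStrip_dropWhile b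
      have hdne : List.dropWhile PySem.Chars.isspace cs ≠ [] := by
        rw [hdrop]; intro h
        simp only [List.append_eq_nil_iff] at h
        exact hdw h.1.1
      have hlines : pvLines cs = b :: (if (pvPartNl cs).2.1 = [] then ([] : List (List Char))
          else pvLines (pvPartNl cs).2.2) := by
        rcases hsep with ⟨hs1, hs2⟩ | hs1
        · rw [if_pos hs1]
          conv_lhs => rw [hdec, hs1, hs2]
          simp only [List.append_nil]
          exact pvLines_nonl b hnl
        · rw [if_neg (by simp [hs1])]
          conv_lhs => rw [hdec, hs1, List.append_assoc, List.singleton_append]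
          exact pvLines_append _ _ hnl
      constructor
      · intro h; exact absurd h hdne
      · intro _
        refine ⟨?_, ?_, ?_⟩
        · rw [hlines, hpart]
          simp [pvFirstNonEmptyA, hbs, hstripb]
        · rw [hpart]; simpa [hstripb] using hbs
        · intro h'
          have hrep : pvReplaceFirstA h' (pvLines cs) =
              h' :: (if (pvPartNl cs).2.1 = [] then ([] : List (List Char))
                else pvLines (pvPartNl cs).2.2) := by
            rw [hlines]; simp [pvReplaceFirstA, hbs]
          rw [hrep, hpart, htake, pvRPartNl_nosep _ (by rw [pvRPartNl_nonl_eq hnltw])]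
          rcases hsep with ⟨hs1, hs2⟩ | hs1
          · rw [hs1, hs2]; simp [PySem.Chars.join_singleton]
          · rw [hs1, if_neg (by simp)]
            cases hx : pvLines (pvPartNl cs).2.2 with
            | nil => exact absurd hx (pvLines_ne_nil _)
            | cons x xs =>
              rw [PySem.Chars.join_cons_cons, ← hx, pvJoin_pvLines]
              simp

theorem ensure_heading_py_eq (content : String) (metadata : List (String × String)) :
    ensure_heading_py content metadata = ensure_heading_py_alt content metadata := by
  unfold ensure_heading_py ensure_heading_py_alt
  by_cases hc : content = ""
  · simp [hc]
  · simp only [if_neg hc, pvSplitOn_nl, PySem.Chars.lstrip]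
    obtain ⟨m1, m2⟩ := pvMain content.toList.length content.toList le_rfl
    by_cases hd : List.dropWhile PySem.Chars.isspace content.toList = []
    · rw [m1 hd, if_pos hd]
    · obtain ⟨g1, g2, g3⟩ := m2 hd
      rw [if_neg hd, pvTake_sub_eq_takeWhile content.toList]
      simp only [g1, ne_eq]
      by_cases hst : PySem.Chars.startswith
          (PySem.Chars.strip (pvPartNl (List.dropWhile PySem.Chars.isspace content.toList)).1)
          ['#'] = true
      · have hna : ¬ (¬ PySem.Chars.strip
            (pvPartNl (List.dropWhile PySem.Chars.isspace content.toList)).1 = [] ∧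
            ¬ PySem.Chars.startswith (PySem.Chars.strip
              (pvPartNl (List.dropWhile PySem.Chars.isspace content.toList)).1) ['#'] = true) :=
          fun h => h.2 hst
        rw [if_neg hna, if_pos hst]
      · rw [if_pos ⟨g2, hst⟩, if_neg hst]
        split_ifs with ht
        · exact congrArg String.ofList (g3 _)
        · rfl

-- ===== VERDICT (by name: the statement is the Claim_ definition above) =====
theorem ensure_heading_py_spec : Claim_equal_ensure_heading_py := by
  intro content metadata _
  unfold Spec_ensure_heading_py
  exact ensure_heading_py_eq content metadata
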